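-- pv_equiv track=rewrite | github.com/rlawlsgura-stack/keyword-app | keyword_app2_fixed222.py | _build_compact_index
-- ===== SOURCE A (Python) =====
-- def _build_compact_index(src_text: str):
--     """
--     Build a whitespace-removed version of the text and an index map
--     from compact index -> original index.
--     """
--     if not src_text:
--         return "", []
--     compact_chars = []
--     index_map = []
--     for i, ch in enumerate(src_text):
--         if ch.isspace():
--             continue
--         compact_chars.append(ch)
--         index_map.append(i)
--     return "".join(compact_chars), index_map
-- ===== SOURCE B (Python) =====
-- def _build_compact_index(src_text: str):
--     """Run-based scan: walk the text as maximal runs, skip whitespace runs,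
--     and copy each non-space run as a whole slice plus a range of indices."""
--     n = len(src_text)
--     parts = []
--     index_map = []
--     i = 0
--     while i < n:
--         if src_text[i].isspace():
--             i += 1
--             continue
--         j = i + 1
--         while j < n and not src_text[j].isspace():
--             j += 1
--         parts.append(src_text[i:j])
--         index_map.extend(range(i, j))
--         i = j
--     return "".join(parts), index_map
-- ===== Notes on version B (the rewrite author's own statement) =====
-- stated objective: alternative
-- what changed: B replaces A's per-character dual-accumulator loop with a run-based scan: an outer while loop skips whitespace runs and, for each maximal non-space run, appends the whole slice src_text[i:j] and extends the index map with range(i, j).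
import Mathlib
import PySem

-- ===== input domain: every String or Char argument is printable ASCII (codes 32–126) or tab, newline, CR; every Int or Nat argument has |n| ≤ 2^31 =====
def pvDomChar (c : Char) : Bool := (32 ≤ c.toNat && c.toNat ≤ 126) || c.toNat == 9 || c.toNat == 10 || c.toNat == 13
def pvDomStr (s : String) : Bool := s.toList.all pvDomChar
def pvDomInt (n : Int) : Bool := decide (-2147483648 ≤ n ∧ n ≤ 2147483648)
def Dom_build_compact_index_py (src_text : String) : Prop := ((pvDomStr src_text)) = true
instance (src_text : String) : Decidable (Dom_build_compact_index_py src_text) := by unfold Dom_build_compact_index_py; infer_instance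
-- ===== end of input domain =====

-- B scans the text as maximal runs, skipping whitespace runs and copying each
-- non-space run as a whole slice plus a range of indices (alternative decomposition, same O(n) cost).


-- ===== PORT A =====
def build_compact_index_py (src_text : String) : String × List Int :=
  if src_text.toList = [] then ("", [])
  else
    let st := (PySem.List.enumerate src_text.toList).foldl
      (fun (acc : List Char × List Int) (p : Int × Char) =>
        if PySem.Chars.isspace p.2 then acc
        else (acc.1 ++ [p.2], acc.2 ++ [p.1])) ([], [])
    (String.mk st.1, st.2)

-- ===== PORT B =====
-- inner while loop: advance j while j < n and src_text[j] is not whitespace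
def pvRunEnd (cs : List Char) (j : Nat) : Nat :=
  if h : j < cs.length then
    if PySem.Chars.isspace cs[j] then j else pvRunEnd cs (j + 1)
  else j
termination_by cs.length - j

-- termination fact for the outer loop (the run end never moves backwards)
theorem pvRunEnd_ge (cs : List Char) (j : Nat) : j ≤ pvRunEnd cs j := by
  fun_induction pvRunEnd cs j with
  | case1 => omega
  | case2 _ _ _ ih => omega
  | case3 => omega

-- outer while loop of B, with the parts / index_map accumulators
def pvGoB (cs : List Char) (i : Nat) (parts : List (List Char)) (idx : List Int) :
    String × List Int :=
  if h : i < cs.length then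
    if PySem.Chars.isspace cs[i] then pvGoB cs (i + 1) parts idx
    else
      let j := pvRunEnd cs (i + 1)
      pvGoB cs j (parts ++ [PySem.List.slice cs (some (i : Int)) (some (j : Int))])
                 (idx ++ PySem.List.pyRange (i : Int) (j : Int) 1)
  else (String.mk parts.flatten, idx)
termination_by cs.length - i
decreasing_by
  · omega
  · have := pvRunEnd_ge cs (i + 1); omega

def build_compact_index_py_alt (src_text : String) : String × List Int :=
  pvGoB src_text.toList 0 [] []

-- ===== PRECONDITION & SPEC =====
def Spec_build_compact_index_py (src_text : String) (out : String × List Int) : Prop := out = build_compact_index_py_alt src_text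
instance (src_text : String) (out : String × List Int) : Decidable (Spec_build_compact_index_py src_text out) := by unfold Spec_build_compact_index_py; infer_instance

-- ===== CLAIM (what is proved, stated in full; the proofs are below) =====
def Claim_equal_build_compact_index_py : Prop := ∀ (src_text : String), Dom_build_compact_index_py src_text → Spec_build_compact_index_py src_text (build_compact_index_py src_text)

-- ===== LEMMAS AND PROOFS =====

-- the common reference point: non-space characters with their (Int) positions
def pvSpec (cs : List Char) (i : Int) : List Char × List Int :=
  match cs with
  | [] => ([], [])
  | c :: t =>
    if PySem.Chars.isspace c then pvSpec t (i + 1)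
    else ((c :: (pvSpec t (i + 1)).1), (i :: (pvSpec t (i + 1)).2))

-- A's loop with its two 'append' accumulators, characterised as filter+map
theorem pv_foldA (l : List (Int × Char)) (a : List Char) (b : List Int) :
    l.foldl (fun (acc : List Char × List Int) (p : Int × Char) =>
        if PySem.Chars.isspace p.2 then acc
        else (acc.1 ++ [p.2], acc.2 ++ [p.1])) (a, b)
      = (a ++ (l.filter (fun p => !PySem.Chars.isspace p.2)).map (fun p => p.2),
         b ++ (l.filter (fun p => !PySem.Chars.isspace p.2)).map (fun p => p.1)) := by
  induction l generalizing a b with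
  | nil => simp
  | cons p t ih =>
    by_cases h : PySem.Chars.isspace p.2 <;> simp [List.foldl_cons, h, ih]

-- A's filter+map over enumerate equals the reference pvSpec
theorem pv_specA (cs : List Char) (k : Int) :
    (((PySem.List.enumerate cs k).filter (fun p => !PySem.Chars.isspace p.2)).map (fun p => p.2),
     ((PySem.List.enumerate cs k).filter (fun p => !PySem.Chars.isspace p.2)).map (fun p => p.1))
      = pvSpec cs k := by
  induction cs generalizing k with
  | nil => simp [PySem.List.enumerate_nil, pvSpec]
  | cons c t ih =>
    by_cases h : PySem.Chars.isspace c <;>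
      simp [PySem.List.enumerate_cons, pvSpec, h, ← ih (k + 1)]

-- run end, characterised by takeWhile on the remaining suffix
theorem pvRunEnd_eq (cs : List Char) (j : Nat) :
    pvRunEnd cs j
      = j + ((cs.drop j).takeWhile (fun c => !PySem.Chars.isspace c)).length := by
  fun_induction pvRunEnd cs j with
  | case1 j h hs =>
    rw [List.drop_eq_getElem_cons h]
    simp [hs]
  | case2 j h hs ih =>
    rw [List.drop_eq_getElem_cons h, List.takeWhile_cons]
    simp only [eq_false_of_ne_true hs, Bool.not_false, if_true, List.length_cons]
    rw [ih]
    omega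
  | case3 j h =>
    rw [List.drop_eq_nil_of_le (by omega)]
    simp

-- pvSpec over a run of non-space characters
theorem pv_spec_run (r rest : List Char) (i : Int)
    (hr : ∀ c ∈ r, PySem.Chars.isspace c = false) :
    pvSpec (r ++ rest) i
      = (r ++ (pvSpec rest (i + r.length)).1,
         PySem.List.pyRange i (i + r.length) 1 ++ (pvSpec rest (i + r.length)).2) := by
  induction r generalizing i with
  | nil => simp [PySem.List.pyRange_one_eq_nil (le_refl i)]
  | cons c t ih =>
    have hc : PySem.Chars.isspace c = false := hr c List.mem_cons_self
    have ht : ∀ c ∈ t, PySem.Chars.isspace c = false :=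
      fun c hcm => hr c (List.mem_cons_of_mem _ hcm)
    have hlt : i < i + ((c :: t).length : Int) := by
      simp only [List.length_cons]; push_cast; omega
    rw [PySem.List.pyRange_one_cons hlt]
    have harith : i + 1 + (t.length : Int) = i + ((c :: t).length : Int) := by
      simp only [List.length_cons]; push_cast; ring
    simp only [List.cons_append, pvSpec, hc, Bool.false_eq_true, if_false,
      ih (i + 1) ht, harith]

-- the outer-loop invariant: pvGoB extends its accumulators by pvSpec of the suffix
theorem pv_goB_inv (cs : List Char) (i : Nat) (parts : List (List Char)) (idx : List Int) :
    pvGoB cs i parts idx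
      = (String.mk (parts.flatten ++ (pvSpec (cs.drop i) i).1),
         idx ++ (pvSpec (cs.drop i) i).2) := by
  fun_induction pvGoB cs i parts idx with
  | case1 i parts idx h hs ih =>
    rw [List.drop_eq_getElem_cons h]
    simp only [pvSpec, hs, if_true]
    rw [ih]
    push_cast
    rfl
  | case2 i parts idx h hs j ih =>
    set p : Char → Bool := fun c => !PySem.Chars.isspace c with hp
    have hdropi : cs.drop i = cs[i] :: cs.drop (i + 1) := List.drop_eq_getElem_cons h
    have hlen : j = i + ((cs.drop i).takeWhile p).length := by
      have := pvRunEnd_eq cs (i + 1)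
      rw [hdropi, List.takeWhile_cons]
      simp only [hp, eq_false_of_ne_true hs, Bool.not_false, if_true, List.length_cons]
      omega
    set r : List Char := (cs.drop i).takeWhile p with hr
    have hsplit : cs.drop i = r ++ cs.drop j := by
      have h1 : cs.drop i = r ++ (cs.drop i).dropWhile p := by
        rw [hr, List.takeWhile_append_dropWhile]
      have h2 : (cs.drop i).dropWhile p = (cs.drop i).drop r.length := by
        conv_rhs => rw [h1]
        rw [List.drop_left]
      rw [h1, h2, List.drop_drop]
      congr 2
      omega
    have hrall : ∀ c ∈ r, PySem.Chars.isspace c = false := by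
      intro c hc
      have := List.mem_takeWhile_imp hc
      simpa [hp] using this
    have hslice : PySem.List.slice cs (some (i : Int)) (some (j : Int)) = r := by
      rw [PySem.List.slice_natCast]
      rw [hsplit, List.take_append_of_le_length (by omega)]
      have hij : j - i = r.length := by omega
      rw [hij, List.take_length]
    have hspec : pvSpec (cs.drop i) i
        = (r ++ (pvSpec (cs.drop j) j).1,
           PySem.List.pyRange (i : Int) (j : Int) 1 ++ (pvSpec (cs.drop j) j).2) := by
      rw [hsplit, pv_spec_run r (cs.drop j) (i : Int) hrall]
      have hcast : (i : Int) + (r.length : Int) = (j : Int) := by omega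
      rw [hcast]
    rw [ih, hspec, hslice]
    simp
  | case3 i parts idx h =>
    rw [List.drop_eq_nil_of_le (by omega)]
    simp [pvSpec]

-- ===== VERDICT (by name: the statement is the Claim_ definition above) =====
theorem build_compact_index_py_spec : Claim_equal_build_compact_index_py := by
  intro s _
  show build_compact_index_py s = build_compact_index_py_alt s
  unfold build_compact_index_py build_compact_index_py_alt
  rw [pv_goB_inv s.toList 0 [] []]
  by_cases hnil : s.toList = []
  · simp [hnil, pvSpec]
    rfl
  · rw [if_neg hnil, pv_foldA]
    have := pv_specA s.toList 0
    simp only [Prod.ext_iff] at this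
    simp [this.1, this.2]
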